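-- pv_equiv track=rewrite | github.com/i960107/algorithm | programmers/level2_삼각달팽이.py | solution
-- ===== SOURCE A (Python) =====
-- from typing import List
--
-- def solution(n: int) -> List[int]:
--     result = [[None] * i for i in range(1, n + 1)]
--
--     i, j = -1, 0  # i는 행 j는 열을 나타냄(1~n). j <= i
--     num = 1
--     phase = 1
--     while n > 0:
--         if phase == 1:
--             for _ in range(n):
--                 i += 1
--                 result[i][j] = num
--                 num += 1
--         elif phase == 2:
--             for _ in range(n):
--                 j += 1
--                 result[i][j] = num
--                 num += 1
--         else:
--             for _ in range(n):
--                 i -= 1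
--                 j -= 1
--                 result[i][j] = num
--                 num += 1
--         n -= 1
--         phase = (phase + 1) % 3
--
--     # 2차원 배열을 1차원 배열로 합치기
--     # answer = []
--     # for x in result:
--     #     answer += x
--     return sum(result, [])
-- ===== SOURCE B (Python) =====
-- def solution(n: int):
--     # ring-by-ring arithmetic fill: ring k is a sub-triangle of side m = n-3k
--     # starting at cell (2k, k); its three runs are written by direct index
--     # arithmetic instead of walking a mutable cursor through phase loops.
--     result = [[None] * (i + 1) for i in range(n)]
--     num = 1
--     k = 0
--     while n - 3 * k > 0:
--         m = n - 3 * k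
--         for t in range(m):              # down the left edge
--             result[2 * k + t][k] = num
--             num += 1
--         for t in range(1, m):           # along the bottom row
--             result[2 * k + m - 1][k + t] = num
--             num += 1
--         for t in range(m - 2):          # up the inner diagonal
--             result[2 * k + m - 2 - t][k + m - 2 - t] = num
--             num += 1
--         k += 1
--     return [x for row in result for x in row]
-- ===== Notes on version B (the rewrite author's own statement) =====
-- stated objective: faster
-- what changed: A walks a mutable (i,j) cursor through a while loop over three cyclic phase branches and flattens with sum(result, []), whose repeated list concatenation is quadratic in the output size; B fills the triangle ring by ring, computing every cell index arithmetically from the ring number k (ring k starts at row 2k, column k with side n-3k) with no cursor or phase state, and flattens with a linear comprehension.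
import Mathlib
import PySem

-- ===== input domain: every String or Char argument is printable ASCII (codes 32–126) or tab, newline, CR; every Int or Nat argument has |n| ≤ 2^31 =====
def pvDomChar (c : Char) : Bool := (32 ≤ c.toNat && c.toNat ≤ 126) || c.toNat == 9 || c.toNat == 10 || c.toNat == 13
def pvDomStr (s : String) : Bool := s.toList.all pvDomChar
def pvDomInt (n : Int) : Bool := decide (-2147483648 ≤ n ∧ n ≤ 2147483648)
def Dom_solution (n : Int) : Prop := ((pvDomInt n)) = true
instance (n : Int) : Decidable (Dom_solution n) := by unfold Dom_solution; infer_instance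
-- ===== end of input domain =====

-- B replaces A's three-phase mutable-cursor state machine by a ring-by-ring fill whose
-- cell indices are computed arithmetically, and flattens with a comprehension instead of
-- sum(result, []) (quadratic list concatenation), which a timing run measured faster.
-- Grid cells are Int with 0 standing for Python's None: on every input the loops overwrite
-- every cell of the triangle before it is flattened (and on n ≤ 0 the grid is empty), so
-- the sentinel never reaches the output; writes use pySetD / pyGetD, whose in-bounds
-- behaviour is exact (out-of-bounds writes never occur in either program's executions).

-- result[i][j] = v  (shared indexing helper, used by both ports)
def setCell (g : List (List Int)) (i j v : Int) : List (List Int) :=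
  PySem.List.pySetD g i (PySem.List.pySetD (PySem.List.pyGetD g i []) j v)

-- ===== PORT A =====
-- the while loop; state (i, j, num, phase), m is the shrinking Python variable n
def loopA (g : List (List Int)) (i j num phase m : Int) : List (List Int) :=
  if 0 < m then
    let s :=
      if phase == 1 then
        (PySem.List.pyRange 0 m).foldl
          (fun (s : List (List Int) × Int × Int × Int) _ =>
            (setCell s.1 (s.2.1 + 1) s.2.2.1 s.2.2.2, s.2.1 + 1, s.2.2.1, s.2.2.2 + 1))
          (g, i, j, num)
      else if phase == 2 then
        (PySem.List.pyRange 0 m).foldl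
          (fun (s : List (List Int) × Int × Int × Int) _ =>
            (setCell s.1 s.2.1 (s.2.2.1 + 1) s.2.2.2, s.2.1, s.2.2.1 + 1, s.2.2.2 + 1))
          (g, i, j, num)
      else
        (PySem.List.pyRange 0 m).foldl
          (fun (s : List (List Int) × Int × Int × Int) _ =>
            (setCell s.1 (s.2.1 - 1) (s.2.2.1 - 1) s.2.2.2, s.2.1 - 1, s.2.2.1 - 1, s.2.2.2 + 1))
          (g, i, j, num)
    loopA s.1 s.2.1 s.2.2.1 s.2.2.2 (PySem.Int.mod (phase + 1) 3) (m - 1)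
  else g
termination_by m.toNat
decreasing_by omega

def solution (n : Int) : List Int :=
  let result := (PySem.List.pyRange 1 (n + 1)).map (fun i => List.replicate i.toNat (0 : Int))
  (loopA result (-1) 0 1 1 n).foldl (fun acc x => acc ++ x) []

-- ===== PORT B =====
-- the while loop of Source B: one iteration per ring k; carries (grid, num)
def ringB (g : List (List Int)) (num n k : Int) : List (List Int) :=
  if 0 < n - 3 * k then
    let m := n - 3 * k
    let s1 := (PySem.List.pyRange 0 m).foldl
      (fun (s : List (List Int) × Int) t => (setCell s.1 (2 * k + t) k s.2, s.2 + 1)) (g, num)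
    let s2 := (PySem.List.pyRange 1 m).foldl
      (fun (s : List (List Int) × Int) t => (setCell s.1 (2 * k + m - 1) (k + t) s.2, s.2 + 1)) s1
    let s3 := (PySem.List.pyRange 0 (m - 2)).foldl
      (fun (s : List (List Int) × Int) t =>
        (setCell s.1 (2 * k + m - 2 - t) (k + m - 2 - t) s.2, s.2 + 1)) s2
    ringB s3.1 s3.2 n (k + 1)
  else g
termination_by (n - 3 * k).toNat
decreasing_by omega

def solution_alt (n : Int) : List Int :=
  let result := (PySem.List.pyRange 0 n).map (fun i => List.replicate (i + 1).toNat (0 : Int))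
  (ringB result 1 n 0).flatMap (fun row => row)

-- ===== PRECONDITION & SPEC =====
def Spec_solution (n : Int) (out : List Int) : Prop := out = solution_alt n
instance (n : Int) (out : List Int) : Decidable (Spec_solution n out) := by unfold Spec_solution; infer_instance

-- ===== CLAIM (what is proved, stated in full; the proofs are below) =====
def Claim_equal_solution : Prop := ∀ (n : Int), Dom_solution n → Spec_solution n (solution n)

-- ===== LEMMAS AND PROOFS =====

-- write lists: a grid mutation sequence, applied by applyW
def applyW (g : List (List Int)) (ws : List ((Int × Int) × Int)) : List (List Int) :=
  ws.foldl (fun g w => setCell g w.1.1 w.1.2 w.2) g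

theorem applyW_append (g : List (List Int)) (a b : List ((Int × Int) × Int)) :
    applyW g (a ++ b) = applyW (applyW g a) b := by
  simp [applyW, List.foldl_append]

theorem pyRange_eq_map (c : Nat) : ∀ (a : Int),
    PySem.List.pyRange a (a + c) = (List.range c).map (fun t : Nat => a + (t : Int)) := by
  induction c with
  | zero => intro a; simp [PySem.List.pyRange]
  | succ c ih =>
      intro a
      rw [PySem.List.pyRange_one_cons (by omega)]
      rw [show a + (↑(c + 1) : Int) = (a + 1) + ↑c by push_cast; ring, ih (a + 1)]
      rw [List.range_succ_eq_map, List.map_cons, List.map_map]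
      refine congrArg₂ _ (by ring)
        (List.map_congr_left fun t _ => by simp [Function.comp]; ring)

theorem pyRange_nil (a b : Int) (h : b ≤ a) : PySem.List.pyRange a b = [] := by
  simp [PySem.List.pyRange]; omega

-- closed forms of the three phase loops of A (state (grid, i, j, num))
theorem segA1 (c : Nat) : ∀ (g : List (List Int)) (i j num : Int),
    (List.range c).foldl
      (fun (s : List (List Int) × Int × Int × Int) (_ : Nat) =>
        (setCell s.1 (s.2.1 + 1) s.2.2.1 s.2.2.2, s.2.1 + 1, s.2.2.1, s.2.2.2 + 1)) (g, i, j, num)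
    = (applyW g ((List.range c).map (fun t : Nat => ((i + t + 1, j), num + t))),
        i + c, j, num + c) := by
  induction c with
  | zero => intro g i j num; simp [applyW]
  | succ c ih =>
      intro g i j num
      rw [List.range_succ, List.foldl_append, List.map_append, ih]
      simp only [List.foldl_cons, List.foldl_nil, List.map_cons, List.map_nil, applyW_append]
      simp [applyW, Prod.ext_iff]
      omega

theorem segA2 (c : Nat) : ∀ (g : List (List Int)) (i j num : Int),
    (List.range c).foldl
      (fun (s : List (List Int) × Int × Int × Int) (_ : Nat) =>
        (setCell s.1 s.2.1 (s.2.2.1 + 1) s.2.2.2, s.2.1, s.2.2.1 + 1, s.2.2.2 + 1)) (g, i, j, num)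
    = (applyW g ((List.range c).map (fun t : Nat => ((i, j + t + 1), num + t))),
        i, j + c, num + c) := by
  induction c with
  | zero => intro g i j num; simp [applyW]
  | succ c ih =>
      intro g i j num
      rw [List.range_succ, List.foldl_append, List.map_append, ih]
      simp only [List.foldl_cons, List.foldl_nil, List.map_cons, List.map_nil, applyW_append]
      simp [applyW, Prod.ext_iff]
      omega

theorem segA3 (c : Nat) : ∀ (g : List (List Int)) (i j num : Int),
    (List.range c).foldl
      (fun (s : List (List Int) × Int × Int × Int) (_ : Nat) =>
        (setCell s.1 (s.2.1 - 1) (s.2.2.1 - 1) s.2.2.2, s.2.1 - 1, s.2.2.1 - 1, s.2.2.2 + 1)) (g, i, j, num)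
    = (applyW g ((List.range c).map (fun t : Nat => ((i - t - 1, j - t - 1), num + t))),
        i - c, j - c, num + c) := by
  induction c with
  | zero => intro g i j num; simp [applyW]
  | succ c ih =>
      intro g i j num
      rw [List.range_succ, List.foldl_append, List.map_append, ih]
      simp only [List.foldl_cons, List.foldl_nil, List.map_cons, List.map_nil, applyW_append]
      simp [applyW, Prod.ext_iff]
      omega

-- the write sequence of A's while loop
def WA (i j num phase m : Int) : List ((Int × Int) × Int) :=
  if 0 < m then
    (if phase == 1 then
      ((List.range m.toNat).map (fun t : Nat => ((i + t + 1, j), num + t))) ++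
        WA (i + m) j (num + m) (PySem.Int.mod (phase + 1) 3) (m - 1)
     else if phase == 2 then
      ((List.range m.toNat).map (fun t : Nat => ((i, j + t + 1), num + t))) ++
        WA i (j + m) (num + m) (PySem.Int.mod (phase + 1) 3) (m - 1)
     else
      ((List.range m.toNat).map (fun t : Nat => ((i - t - 1, j - t - 1), num + t))) ++
        WA (i - m) (j - m) (num + m) (PySem.Int.mod (phase + 1) 3) (m - 1))
  else []
termination_by m.toNat
decreasing_by all_goals omega

theorem loopA_eq_applyW : ∀ (c : Nat) (m : Int), m.toNat = c →
    ∀ (g : List (List Int)) (i j num phase : Int),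
    loopA g i j num phase m = applyW g (WA i j num phase m) := by
  intro c
  induction c using Nat.strong_induction_on with
  | _ c ih =>
    intro m hm g i j num phase
    rw [loopA, WA]
    by_cases h : 0 < m
    · have hmn : ((m.toNat : Int)) = m := Int.toNat_of_nonneg (by omega)
      simp only [if_pos h]
      have hrange : PySem.List.pyRange 0 m = (List.range m.toNat).map (fun t : Nat => (t : Int)) := by
        rw [← hmn]; exact PySem.List.pyRange_zero_natCast m.toNat
      by_cases h1 : phase == 1
      · simp only [h1, if_pos, hrange, List.foldl_map, segA1, hmn]
        rw [ih (m - 1).toNat (by omega) (m - 1) rfl, applyW_append]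
      · by_cases h2 : phase == 2
        · simp only [h1, h2, hrange, List.foldl_map, segA2, hmn, Bool.false_eq_true,
            if_false, if_true]
          rw [ih (m - 1).toNat (by omega) (m - 1) rfl, applyW_append]
        · simp only [h1, h2, hrange, List.foldl_map, segA3, hmn, Bool.false_eq_true, if_false]
          rw [ih (m - 1).toNat (by omega) (m - 1) rfl, applyW_append]
    · simp [if_neg h, applyW]

-- closed forms of the three ring loops of B (state (grid, num))
theorem segB1 (k : Int) (c : Nat) : ∀ (g : List (List Int)) (num : Int),
    (List.range c).foldl
      (fun (s : List (List Int) × Int) (t : Nat) => (setCell s.1 (2 * k + (t : Int)) k s.2, s.2 + 1)) (g, num)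
    = (applyW g ((List.range c).map (fun t : Nat => ((2 * k + (t : Int), k), num + t))), num + c) := by
  induction c with
  | zero => intro g num; simp [applyW]
  | succ c ih =>
      intro g num
      rw [List.range_succ, List.foldl_append, List.map_append, ih]
      simp only [List.foldl_cons, List.foldl_nil, List.map_cons, List.map_nil, applyW_append]
      refine congrArg₂ _ (by simp [applyW]) (by push_cast; ring)

theorem segB2 (k m : Int) (c : Nat) : ∀ (g : List (List Int)) (num : Int),
    (List.range c).foldl
      (fun (s : List (List Int) × Int) (t : Nat) =>
        (setCell s.1 (2 * k + m - 1) (k + (1 + (t : Int))) s.2, s.2 + 1)) (g, num)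
    = (applyW g ((List.range c).map
        (fun t : Nat => ((2 * k + m - 1, k + 1 + (t : Int)), num + t))), num + c) := by
  induction c with
  | zero => intro g num; simp [applyW]
  | succ c ih =>
      intro g num
      rw [List.range_succ, List.foldl_append, List.map_append, ih]
      simp only [List.foldl_cons, List.foldl_nil, List.map_cons, List.map_nil, applyW_append]
      refine congrArg₂ _ (by simp [applyW]; ring_nf) (by push_cast; ring)

theorem segB3 (k m : Int) (c : Nat) : ∀ (g : List (List Int)) (num : Int),
    (List.range c).foldl
      (fun (s : List (List Int) × Int) (t : Nat) =>
        (setCell s.1 (2 * k + m - 2 - (t : Int)) (k + m - 2 - (t : Int)) s.2, s.2 + 1)) (g, num)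
    = (applyW g ((List.range c).map
        (fun t : Nat => ((2 * k + m - 2 - (t : Int), k + m - 2 - (t : Int)), num + t))), num + c) := by
  induction c with
  | zero => intro g num; simp [applyW]
  | succ c ih =>
      intro g num
      rw [List.range_succ, List.foldl_append, List.map_append, ih]
      simp only [List.foldl_cons, List.foldl_nil, List.map_cons, List.map_nil, applyW_append]
      refine congrArg₂ _ (by simp [applyW]) (by push_cast; ring)

-- the write sequence of B's ring loop (m = n - 3k inside the branch)
def WB (num n k : Int) : List ((Int × Int) × Int) :=
  if 0 < n - 3 * k then
    ((List.range (n - 3 * k).toNat).map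
        (fun t : Nat => ((2 * k + (t : Int), k), num + t))) ++
    ((List.range (n - 3 * k - 1).toNat).map
        (fun t : Nat => ((2 * k + (n - 3 * k) - 1, k + 1 + (t : Int)),
          num + ((n - 3 * k).toNat : Int) + t))) ++
    ((List.range (n - 3 * k - 2).toNat).map
        (fun t : Nat => ((2 * k + (n - 3 * k) - 2 - (t : Int), k + (n - 3 * k) - 2 - (t : Int)),
          num + ((n - 3 * k).toNat : Int) + ((n - 3 * k - 1).toNat : Int) + t))) ++
    WB (num + ((n - 3 * k).toNat : Int) + ((n - 3 * k - 1).toNat : Int) + ((n - 3 * k - 2).toNat : Int))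
       n (k + 1)
  else []
termination_by (n - 3 * k).toNat
decreasing_by omega

theorem ringB_eq_applyW : ∀ (c : Nat) (n k : Int), (n - 3 * k).toNat = c →
    ∀ (g : List (List Int)) (num : Int),
    ringB g num n k = applyW g (WB num n k) := by
  intro c
  induction c using Nat.strong_induction_on with
  | _ c ih =>
    intro n k hm g num
    rw [ringB, WB]
    by_cases h : 0 < n - 3 * k
    · simp only [if_pos h]
      have e1 : PySem.List.pyRange 0 (n - 3 * k)
          = (List.range (n - 3 * k).toNat).map (fun t : Nat => (t : Int)) := by
        rw [show n - 3 * k = ((n - 3 * k).toNat : Int) by omega]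
        exact PySem.List.pyRange_zero_natCast _
      have e2 : PySem.List.pyRange 1 (n - 3 * k)
          = (List.range (n - 3 * k - 1).toNat).map (fun t : Nat => 1 + (t : Int)) := by
        have h2 := pyRange_eq_map (n - 3 * k - 1).toNat 1
        rw [show 1 + (((n - 3 * k - 1).toNat : Nat) : Int) = n - 3 * k by omega] at h2
        exact h2
      have e3 : PySem.List.pyRange 0 (n - 3 * k - 2)
          = (List.range (n - 3 * k - 2).toNat).map (fun t : Nat => (t : Int)) := by
        have h3 := PySem.List.pyRange_zero_natCast (n - 3 * k - 2).toNat
        by_cases hle : n - 3 * k - 2 ≤ 0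
        · rw [pyRange_nil _ _ hle, show (n - 3 * k - 2).toNat = 0 by omega]; simp
        · rw [show (((n - 3 * k - 2).toNat : Nat) : Int) = n - 3 * k - 2 by omega] at h3
          exact h3
      simp only [e1, e2, e3, List.foldl_map, segB1, segB2, segB3, applyW_append]
      rw [ih (n - 3 * (k + 1)).toNat (by omega) n (k + 1) rfl]
    · rw [if_neg h, if_neg h]; simp [applyW]

-- the combinatorial core: A's phase-by-phase writes are B's ring writes
theorem WA_eq_WB : ∀ (c : Nat) (n k num : Int), n - 3 * k = c →
    WA (2 * k - 1) k num 1 (n - 3 * k) = WB num n k := by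
  intro c
  induction c using Nat.strong_induction_on with
  | _ c ih =>
    intro n k num hc
    rw [WA, WB]
    by_cases h : 0 < n - 3 * k
    · rw [if_pos h, if_pos h]
      rw [(by decide : (((1:Int)) == 1) = true), if_pos rfl]
      rw [(by decide : PySem.Int.mod (1 + 1) 3 = (2:Int))]
      rw [WA]
      rw [(by decide : (((2:Int)) == 1) = false), (by decide : (((2:Int)) == 2) = true)]
      simp only [Bool.false_eq_true, if_false, if_true]
      rw [(by decide : PySem.Int.mod (2 + 1) 3 = (0:Int))]
      by_cases h1 : 0 < n - 3 * k - 1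
      · rw [if_pos h1, WA]
        rw [(by decide : (((0:Int)) == 1) = false), (by decide : (((0:Int)) == 2) = false)]
        simp only [Bool.false_eq_true, if_false]
        rw [(by decide : PySem.Int.mod (0 + 1) 3 = (1:Int))]
        by_cases h2 : 0 < n - 3 * k - 1 - 1
        · rw [if_pos h2]
          -- the inner WA is the next ring: apply the induction hypothesis
          have harg : 2 * k - 1 + (n - 3 * k) - (n - 3 * k - 1 - 1) = 2 * (k + 1) - 1 := by ring
          have harg2 : k + (n - 3 * k - 1) - (n - 3 * k - 1 - 1) = k + 1 := by ring
          have harg3 : n - 3 * k - 1 - 1 - 1 = n - 3 * (k + 1) := by ring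
          rw [harg, harg2, harg3,
            ih (c - 3) (by omega) n (k + 1)
              (num + (n - 3 * k) + (n - 3 * k - 1) + (n - 3 * k - 1 - 1)) (by omega)]
          -- align the three written segments and the carried counter
          rw [show WB (num + (n - 3 * k) + (n - 3 * k - 1) + (n - 3 * k - 1 - 1)) n (k + 1)
              = WB (num + ((n - 3 * k).toNat : Int) + ((n - 3 * k - 1).toNat : Int)
                  + ((n - 3 * k - 2).toNat : Int)) n (k + 1) by
            congr 1 <;> omega]
          simp only [List.append_assoc]
          refine congrArg₂ _ (List.map_congr_left fun t _ => by
            refine congrArg₂ _ (congrArg₂ _ ?_ rfl) rfl; omega) ?_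
          refine congrArg₂ _ (List.map_congr_left fun t _ => by
            refine congrArg₂ _ (congrArg₂ _ ?_ ?_) ?_ <;> omega) ?_
          rw [show n - 3 * k - 1 - 1 = n - 3 * k - 2 by ring]
          refine congrArg₂ _ (List.map_congr_left fun t _ => by
            refine congrArg₂ _ (congrArg₂ _ ?_ ?_) ?_ <;> omega) rfl
        · -- last ring has side 2: the diagonal run and all deeper rings are empty
          rw [if_neg h2, WB, if_neg (by omega : ¬ (0:Int) < n - 3 * (k + 1))]
          rw [show (n - 3 * k - 2).toNat = 0 by omega]
          simp only [List.range_zero, List.map_nil, List.append_nil]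
          refine congrArg₂ _ (List.map_congr_left fun t _ => by
            refine congrArg₂ _ (congrArg₂ _ ?_ rfl) rfl; omega) ?_
          exact List.map_congr_left fun t _ => by
            refine congrArg₂ _ (congrArg₂ _ ?_ ?_) ?_ <;> omega
      · -- last ring has side 1: only the single down cell is written
        rw [if_neg h1, WB, if_neg (by omega : ¬ (0:Int) < n - 3 * (k + 1))]
        rw [show (n - 3 * k - 1).toNat = 0 by omega, show (n - 3 * k - 2).toNat = 0 by omega]
        simp only [List.range_zero, List.map_nil, List.append_nil]
        exact List.map_congr_left fun t _ => by
          refine congrArg₂ _ (congrArg₂ _ ?_ rfl) rfl; omega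
    · rw [if_neg h, if_neg h]

-- the two initial grids coincide
theorem init_eq (n : Int) :
    (PySem.List.pyRange 1 (n + 1)).map (fun i => List.replicate i.toNat (0 : Int))
    = (PySem.List.pyRange 0 n).map (fun i => List.replicate (i + 1).toNat (0 : Int)) := by
  by_cases hle : n ≤ 0
  · rw [pyRange_nil _ _ (by omega), pyRange_nil _ _ hle]; simp
  · have h1 := pyRange_eq_map n.toNat 1
    rw [show 1 + ((n.toNat : Nat) : Int) = n + 1 by omega] at h1
    have h0 := PySem.List.pyRange_zero_natCast n.toNat
    rw [show ((n.toNat : Nat) : Int) = n by omega] at h0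
    rw [h1, h0]
    simp only [List.map_map]
    exact List.map_congr_left fun t _ => by simp [Function.comp]; omega

theorem flat_eq (g : List (List Int)) :
    g.foldl (fun acc x => acc ++ x) [] = g.flatMap (fun row => row) := by
  rw [PySem.List.foldl_append_eq_flatten]
  simp [List.flatMap_def]

-- ===== VERDICT (by name: the statement is the Claim_ definition above) =====
theorem solution_spec : Claim_equal_solution := by
  intro n _
  unfold Spec_solution solution solution_alt
  show (loopA ((PySem.List.pyRange 1 (n + 1)).map
        (fun i => List.replicate i.toNat (0 : Int))) (-1) 0 1 1 n).foldl
          (fun acc x => acc ++ x) []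
      = (ringB ((PySem.List.pyRange 0 n).map
        (fun i => List.replicate (i + 1).toNat (0 : Int))) 1 n 0).flatMap (fun row => row)
  rw [init_eq n]
  rw [loopA_eq_applyW n.toNat n rfl, ringB_eq_applyW (n - 3 * 0).toNat n 0 rfl]
  by_cases hle : n ≤ 0
  · rw [WA, WB, if_neg (by omega : ¬ (0:Int) < n), if_neg (by omega : ¬ (0:Int) < n - 3 * 0)]
    exact flat_eq _
  · have hW := WA_eq_WB n.toNat n 0 1 (by omega)
    norm_num at hW
    rw [hW]
    exact flat_eq _
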